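-- pv_equiv track=rewrite | github.com/idofrizler/wordle-hacker | WordleDictionary.py | sum_word_frequencies
-- ===== SOURCE A (Python) =====
-- def sum_word_frequencies(word, letter_frequencies):
--     freq_sum = 0
--     letters_set = set()
--     for c in word:
--         if c not in letters_set:
--             freq_sum += letter_frequencies[c]
--             letters_set.add(c)
--
--     return freq_sum
-- ===== SOURCE B (Python) =====
-- def sum_word_frequencies(word, letter_frequencies):
--     if not word:
--         return 0
--     first = word[0]
--     rest = ''.join(c for c in word[1:] if c != first)
--     return letter_frequencies[first] + sum_word_frequencies(rest, letter_frequencies)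
-- ===== Notes on version B (the rewrite author's own statement) =====
-- stated objective: alternative
-- what changed: B replaces A's single pass with a seen-set and accumulator by a recursion that peels the first letter, adds its frequency, strips all remaining occurrences of that letter from the word and recurses on the shrunken word, so no membership structure is kept at all.
import Mathlib
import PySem

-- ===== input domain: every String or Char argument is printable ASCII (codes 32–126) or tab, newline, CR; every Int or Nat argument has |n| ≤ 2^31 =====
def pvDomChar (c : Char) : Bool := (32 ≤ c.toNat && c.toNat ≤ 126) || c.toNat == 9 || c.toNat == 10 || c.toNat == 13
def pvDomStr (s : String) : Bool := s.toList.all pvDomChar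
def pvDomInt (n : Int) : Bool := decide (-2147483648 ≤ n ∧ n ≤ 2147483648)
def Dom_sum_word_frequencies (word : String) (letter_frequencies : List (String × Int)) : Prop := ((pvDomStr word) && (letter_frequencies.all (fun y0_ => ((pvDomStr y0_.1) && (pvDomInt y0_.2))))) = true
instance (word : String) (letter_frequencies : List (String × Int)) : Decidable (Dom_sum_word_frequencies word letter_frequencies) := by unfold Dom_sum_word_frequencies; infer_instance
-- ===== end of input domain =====

-- B replaces A's seen-set pass by a recursion: peel the first letter, add its frequency,
-- strip its remaining occurrences, recurse (alternative decomposition, no membership structure).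
-- Equivalence of return values on Pre_ (outside it both Pythons raise KeyError).

-- ===== PORT A =====
-- literal port of A: one pass over word, state = (freq_sum, letters_set of the chars seen);
-- letter_frequencies[c] is ported as Dict.getD … 0, exact under Pre_ (KeyError excluded there).
def sum_word_frequencies (word : String) (letter_frequencies : List (String × Int)) : Int :=
  (word.toList.foldl
    (fun (st : Int × PySem.Set Char) c =>
      if PySem.Set.contains st.2 c then st
      else (st.1 + (PySem.Dict.ofList letter_frequencies).getD (String.ofList [c]) 0,
            PySem.Set.add st.2 c))
    (0, PySem.Set.empty)).1

-- ===== PORT B =====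
-- literal port of B's recursion, on the word's character list: empty → 0; otherwise the first
-- char's frequency plus the recursive call on the tail with all copies of that char filtered out
-- (''.join(c for c in word[1:] if c != first) is exactly that filter on the char list).
def swfGo (letter_frequencies : List (String × Int)) (cs : List Char) : Int :=
  match cs with
  | [] => 0
  | c :: rest =>
      (PySem.Dict.ofList letter_frequencies).getD (String.ofList [c]) 0
        + swfGo letter_frequencies (rest.filter (fun x => x != c))
termination_by cs.length
decreasing_by
  simpa using Nat.lt_succ_of_le (List.length_filter_le _ rest)

def sum_word_frequencies_alt (word : String) (letter_frequencies : List (String × Int)) : Int :=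
  swfGo letter_frequencies word.toList

-- ===== PRECONDITION & SPEC =====
-- Pre_ excludes exactly the inputs where Python A raises KeyError: some letter of word is not a key.
def Pre_sum_word_frequencies (word : String) (letter_frequencies : List (String × Int)) : Prop :=
  (word.toList.all (fun c => (PySem.Dict.ofList letter_frequencies).contains (String.ofList [c]))) = true
instance (word : String) (letter_frequencies : List (String × Int)) : Decidable (Pre_sum_word_frequencies word letter_frequencies) := by unfold Pre_sum_word_frequencies; infer_instance

def pvWitness_sum_word_frequencies : String × (List (String × Int)) := ("abba", [("a", 3), ("b", 5)])

def Spec_sum_word_frequencies (word : String) (letter_frequencies : List (String × Int)) (out : Int) : Prop := out = sum_word_frequencies_alt word letter_frequencies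
instance (word : String) (letter_frequencies : List (String × Int)) (out : Int) : Decidable (Spec_sum_word_frequencies word letter_frequencies out) := by unfold Spec_sum_word_frequencies; infer_instance

-- ===== CLAIM (what is proved, stated in full; the proofs are below) =====
def Claim_equal_sum_word_frequencies : Prop := ∀ (word : String) (letter_frequencies : List (String × Int)), Dom_sum_word_frequencies word letter_frequencies → Pre_sum_word_frequencies word letter_frequencies → Spec_sum_word_frequencies word letter_frequencies (sum_word_frequencies word letter_frequencies)

-- ===== LEMMAS AND PROOFS =====

-- A's interleaved loop, from any (s, seen) state, adds exactly the sum of g over the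
-- elements newly inserted into the seen-set.
theorem pv_loopA_eq {α : Type} [BEq α] [LawfulBEq α] (g : α → Int) (ks : List α)
    (s : Int) (seen : PySem.Set α) :
    (ks.foldl
      (fun (st : Int × PySem.Set α) k =>
        if PySem.Set.contains st.2 k then st
        else (st.1 + g k, PySem.Set.add st.2 k))
      (s, seen)).1
    = s + (ks.foldl PySem.Set.add seen).foldl (fun a k => a + g k) 0
        - seen.foldl (fun a k => a + g k) 0 := by
  induction ks generalizing s seen with
  | nil => simp
  | cons k ks ih =>
    simp only [List.foldl_cons]
    by_cases h : k ∈ seen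
    · have hc : PySem.Set.contains seen k = true := by
        simp [PySem.Set.contains_eq_listContains, h]
      rw [hc, if_pos rfl, PySem.Set.add_of_mem h, ih]
    · have hc : PySem.Set.contains seen k = false := by
        simp [PySem.Set.contains_eq_listContains, h]
      rw [hc, if_neg Bool.false_ne_true, ih, PySem.Set.add_of_not_mem h]
      have : (seen ++ [k]).foldl (fun a x => a + g x) 0
          = seen.foldl (fun a x => a + g x) 0 + g k := by
        rw [List.foldl_append]
        simp only [List.foldl_cons, List.foldl_nil]
      rw [this]
      ring

-- filtering out an element already in the accumulated set does not change the Set.add fold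
theorem pv_foldl_add_filter {α : Type} [BEq α] [LawfulBEq α] (c : α) :
    ∀ (ys : List α) (seen : PySem.Set α), c ∈ seen →
      List.foldl PySem.Set.add seen (ys.filter (fun x => x != c))
        = List.foldl PySem.Set.add seen ys := by
  intro ys
  induction ys with
  | nil => intro seen _; rfl
  | cons y ys ih =>
    intro seen hc
    by_cases hyc : y = c
    · subst hyc
      simp only [List.filter_cons, bne_self_eq_false, Bool.false_eq_true,
        List.foldl_cons, PySem.Set.add_of_mem hc]
      exact ih seen hc
    · have : (y != c) = true := by simp [bne, hyc]
      simp only [List.filter_cons, this, if_pos, List.foldl_cons]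
      refine ih (PySem.Set.add seen y) ?_
      by_cases hy : y ∈ seen
      · rwa [PySem.Set.add_of_mem hy]
      · rw [PySem.Set.add_of_not_mem hy]; exact List.mem_append_left _ hc

-- a Set.add fold starting at c :: t, over elements avoiding c, carries c through unchanged
theorem pv_foldl_add_cons {α : Type} [BEq α] [LawfulBEq α] (c : α) :
    ∀ (ys : List α) (t : PySem.Set α), c ∉ ys →
      List.foldl PySem.Set.add (c :: t) ys = c :: List.foldl PySem.Set.add t ys := by
  intro ys
  induction ys with
  | nil => intro t _; rfl
  | cons y ys ih =>
    intro t hc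
    have hyc : y ≠ c := fun h => hc (h ▸ List.mem_cons_self)
    have hstep : PySem.Set.add (c :: t) y = c :: PySem.Set.add t y := by
      simp only [PySem.Set.add, PySem.Set.contains_eq_listContains, List.contains_cons]
      have : (y == c) = false := by simp [hyc]
      rw [this]
      by_cases hy : y ∈ t
      · simp [hy]
      · simp [hy]
    rw [List.foldl_cons, List.foldl_cons, hstep]
    exact ih _ (fun h => hc (List.mem_cons_of_mem _ h))

-- set(word) peels: the distinct elements of c :: rest are c followed by the distinct
-- elements of rest with the copies of c filtered out
theorem pv_ofList_cons_filter {α : Type} [BEq α] [LawfulBEq α] (c : α) (rest : List α) :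
    PySem.Set.ofList (c :: rest) = c :: PySem.Set.ofList (rest.filter (fun x => x != c)) := by
  rw [PySem.Set.ofList_eq_foldl, PySem.Set.ofList_eq_foldl, List.foldl_cons]
  have hadd : PySem.Set.add ([] : PySem.Set α) c = [c] := rfl
  rw [hadd, ← pv_foldl_add_filter c rest [c] List.mem_cons_self]
  refine pv_foldl_add_cons c _ ([] : PySem.Set α) ?_
  intro h
  rcases List.mem_filter.mp h with ⟨-, hne⟩
  simp at hne

-- B's recursion computes the sum of the frequencies over the distinct characters
theorem pv_swfGo_eq (lf : List (String × Int)) :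
    ∀ (cs : List Char),
      swfGo lf cs
        = ((PySem.Set.ofList cs).map
            (fun c => (PySem.Dict.ofList lf).getD (String.ofList [c]) 0)).sum := by
  intro cs
  induction cs using swfGo.induct with
  | case1 => simp [swfGo]
  | case2 c rest ih =>
    rw [swfGo, pv_ofList_cons_filter, List.map_cons, List.sum_cons]
    congr 1
    simpa using ih

-- ===== VERDICT (by name: the statement is the Claim_ definition above) =====
theorem sum_word_frequencies_spec : Claim_equal_sum_word_frequencies := by
  intro word lf _ _
  unfold Spec_sum_word_frequencies sum_word_frequencies sum_word_frequencies_alt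
  rw [pv_loopA_eq, pv_swfGo_eq]
  simp only [PySem.Set.empty, List.foldl_nil, sub_zero]
  rw [← PySem.Set.ofList_eq_foldl,
      PySem.List.foldl_add (g := fun c => (PySem.Dict.ofList lf).getD (String.ofList [c]) 0)
        (l := PySem.Set.ofList word.toList) (a := 0)]
  simp
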